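-- pv_equiv track=rewrite | github.com/QingboTan/CP2410 | Qingbo-Tan-Week-6/exercise-5.py | least_popular_person
-- ===== SOURCE A (Python) =====
-- import math
--
-- def least_popular_person(graph):
--     least_friendship_count = math.inf
--
--     for node in graph:
--         if len(graph[node]) < least_friendship_count:
--             least_friendship_count = len(graph[node])
--
--     queue_lpp = []
--
--     for node in graph:
--         if len(graph[node]) == least_friendship_count:
--             queue_lpp.append(node)
--     return queue_lpp
-- ===== SOURCE B (Python) =====
-- def least_popular_person(graph):
--     least = None
--     result = []
--     for node, friends in graph.items():
--         c = len(friends)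
--         if least is None or c < least:
--             least = c
--             result = [node]
--         elif c == least:
--             result.append(node)
--     return result
-- ===== Notes on version B (the rewrite author's own statement) =====
-- stated objective: alternative
-- what changed: Replaces A's two passes (one to find the minimum friend count via dict lookups, one to collect matching nodes) with a single pass over graph.items() maintaining the running minimum and a result list that is reset whenever a strictly smaller count appears.
import Mathlib
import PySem

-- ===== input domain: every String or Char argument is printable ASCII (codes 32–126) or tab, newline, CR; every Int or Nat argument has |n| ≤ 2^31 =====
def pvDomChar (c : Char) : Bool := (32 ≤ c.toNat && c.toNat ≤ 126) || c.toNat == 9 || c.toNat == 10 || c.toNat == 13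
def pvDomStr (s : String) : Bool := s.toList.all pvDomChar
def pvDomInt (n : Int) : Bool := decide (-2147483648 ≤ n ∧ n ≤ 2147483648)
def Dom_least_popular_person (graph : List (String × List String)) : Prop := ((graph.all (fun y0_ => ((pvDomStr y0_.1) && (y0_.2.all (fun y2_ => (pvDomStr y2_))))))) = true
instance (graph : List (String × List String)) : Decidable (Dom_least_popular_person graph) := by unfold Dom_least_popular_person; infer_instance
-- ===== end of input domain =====

-- B fuses A's two passes (min-count pass + collect pass, each doing a dict lookup) into one
-- pass over the items with a reset-on-new-minimum rule; equal on dicts (nodup keys).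

-- ===== PORT A =====
-- two passes over the keys; graph[node] is a first-match lookup; math.inf is modelled by
-- Option Int: none compares greater than every length ('l < inf' true, 'l == inf' false)
def least_popular_person (graph : List (String × List String)) : List String :=
  let d := PySem.Dict.mk graph
  let least : Option Int :=
    graph.foldl (fun lc p =>
      let l : Int := ((d.getD p.1 []).length : Int)
      match lc with
      | none => some l
      | some m => if l < m then some l else some m) none
  graph.foldl (fun q p =>
      let l : Int := ((d.getD p.1 []).length : Int)
      match least with
      | none => q
      | some m => if l = m then q ++ [p.1] else q) []

-- ===== PORT B =====
-- single pass over the (node, friends) items: state = (running minimum as Option Int, result)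
def least_popular_person_alt (graph : List (String × List String)) : List String :=
  (graph.foldl (fun (st : Option Int × List String) p =>
      let c : Int := (p.2.length : Int)
      match st.1 with
      | none => (some c, [p.1])
      | some m =>
        if c < m then (some c, [p.1])
        else if c = m then (some m, st.2 ++ [p.1])
        else st) (none, [])).2

-- ===== PRECONDITION & SPEC =====
-- Pre_ excludes association lists with duplicate keys: such an input cannot arise from a
-- Python dict, and on it the assoc-list reading of A (first-match lookup per key occurrence)
-- vs B (each pair's own value) is accidental.
def Pre_least_popular_person (graph : List (String × List String)) : Prop :=
  (graph.map Prod.fst).Nodup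
instance (graph : List (String × List String)) : Decidable (Pre_least_popular_person graph) := by
  unfold Pre_least_popular_person; infer_instance

def pvWitness_least_popular_person : (List (String × List String)) :=
  [("a", ["b", "c"]), ("b", ["a"]), ("c", ["a"])]

def Spec_least_popular_person (graph : List (String × List String)) (out : List String) : Prop := out = least_popular_person_alt graph
instance (graph : List (String × List String)) (out : List String) : Decidable (Spec_least_popular_person graph out) := by unfold Spec_least_popular_person; infer_instance

-- ===== CLAIM (what is proved, stated in full; the proofs are below) =====
def Claim_equal_least_popular_person : Prop := ∀ (graph : List (String × List String)), Dom_least_popular_person graph → Pre_least_popular_person graph → Spec_least_popular_person graph (least_popular_person graph)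

-- ===== LEMMAS AND PROOFS =====

-- running minimum of the friend counts, seeded with m
def pvFmin (m : Int) (xs : List (String × List String)) : Int :=
  xs.foldl (fun a p => min a (p.2.length : Int)) m

theorem pvFmin_le (xs : List (String × List String)) (m : Int) : pvFmin m xs ≤ m := by
  induction xs generalizing m with
  | nil => simp [pvFmin]
  | cons p t ih =>
    have := ih (min m (p.2.length : Int))
    simp only [pvFmin, List.foldl_cons] at *
    exact le_trans this (min_le_left _ _)

-- with nodup keys, the dict lookup of a pair's key returns that pair's value
theorem pvLookup_eq (graph : List (String × List String))
    (hnd : (graph.map Prod.fst).Nodup) :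
    ∀ p ∈ graph, (PySem.Dict.mk graph).getD p.1 [] = p.2 := by
  intro p hp
  exact PySem.Dict.getD_of_mem_items _ (by simpa using hp)
    (by simpa [PySem.Dict.keys] using hnd) []

-- A's min loop computes pvFmin
theorem pvAmin_eq (xs : List (String × List String)) (m : Int) :
    xs.foldl (fun lc p =>
      match lc with
      | none => some ((p.2.length : Int))
      | some m => if (p.2.length : Int) < m then some (p.2.length : Int) else some m)
      (some m) = some (pvFmin m xs) := by
  induction xs generalizing m with
  | nil => simp [pvFmin]
  | cons p t ih =>
    simp only [List.foldl_cons, pvFmin, List.foldl_cons]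
    have h : (if (p.2.length : Int) < m then some ((p.2.length : Int)) else some m)
        = some (min m (p.2.length : Int)) := by
      split_ifs with h <;> simp [min_def] <;> omega
    rw [h, ih]
    rfl

-- A's collect loop is a filter
theorem pvAcollect_eq (xs : List (String × List String)) (M : Int) (acc : List String) :
    xs.foldl (fun q p => if (p.2.length : Int) = M then q ++ [p.1] else q) acc
      = acc ++ (xs.filter (fun p => decide ((p.2.length : Int) = M))).map Prod.fst := by
  induction xs generalizing acc with
  | nil => simp
  | cons p t ih =>
    simp only [List.foldl_cons, List.filter_cons]
    by_cases h : (p.2.length : Int) = M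
    · simp [h, ih]
    · simp [h, ih]

-- B's fold, seeded with (some m, acc)
theorem pvB_eq (xs : List (String × List String)) (m : Int) (acc : List String) :
    xs.foldl (fun (st : Option Int × List String) p =>
      match st.1 with
      | none => (some ((p.2.length : Int)), [p.1])
      | some m =>
        if (p.2.length : Int) < m then (some (p.2.length : Int), [p.1])
        else if (p.2.length : Int) = m then (some m, st.2 ++ [p.1])
        else st) (some m, acc)
    = (some (pvFmin m xs),
       (if pvFmin m xs < m then [] else acc)
         ++ (xs.filter (fun p => decide ((p.2.length : Int) = pvFmin m xs))).map Prod.fst) := by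
  induction xs generalizing m acc with
  | nil => simp [pvFmin]
  | cons p t ih =>
    have hfm : pvFmin m (p :: t) = pvFmin (min m (p.2.length : Int)) t := rfl
    simp only [List.foldl_cons, List.filter_cons, hfm]
    by_cases h1 : (p.2.length : Int) < m
    · have hmin : min m (p.2.length : Int) = (p.2.length : Int) := by omega
      rw [hmin, if_pos h1, ih]
      have hle : pvFmin (p.2.length : Int) t ≤ (p.2.length : Int) := pvFmin_le _ _
      set M := pvFmin ((p.2.length : Int)) t with hMeq
      by_cases h2 : (p.2.length : Int) = M
      · simp [h2, (by omega : M < m)]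
      · have hl : M < (p.2.length : Int) := lt_of_le_of_ne hle (by omega)
        simp [h2, hl, (by omega : M < m)]
    · have hmin : min m (p.2.length : Int) = m := by omega
      rw [hmin, if_neg h1]
      have hle : pvFmin m t ≤ m := pvFmin_le _ _
      by_cases h2 : (p.2.length : Int) = m
      · rw [if_pos h2, ih]
        set M := pvFmin m t with hMeq
        by_cases h3 : M < m
        · have hne : ¬ (p.2.length : Int) = M := by omega
          simp [h3]
          rw [if_neg hne]
        · have hM : M = m := by omega
          simp [hM, h2]
      · rw [if_neg h2, ih]
        set M := pvFmin m t with hMeq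
        have hne : ¬ (p.2.length : Int) = M := by omega
        simp [hne]

-- ===== VERDICT (by name: the statement is the Claim_ definition above) =====
theorem least_popular_person_spec : Claim_equal_least_popular_person := by
  intro graph _ hpre
  unfold Spec_least_popular_person least_popular_person least_popular_person_alt
  dsimp only
  have hlk := pvLookup_eq graph hpre
  rw [PySem.List.foldl_congr_mem _ _ (fun (lc : Option Int) p =>
        match lc with
        | none => some ((p.2.length : Int))
        | some m => if (p.2.length : Int) < m then some (p.2.length : Int) else some m) _
      (by intro acc x hx; simp only [hlk x hx])]
  cases graph with
  | nil => rfl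
  | cons p t =>
    have h0 : List.foldl (fun (lc : Option Int) p =>
        match lc with
        | none => some ((p.2.length : Int))
        | some m => if (p.2.length : Int) < m then some (p.2.length : Int) else some m)
        none (p :: t) = some (pvFmin (p.2.length : Int) t) := by
      rw [List.foldl_cons]; exact pvAmin_eq t _
    rw [h0]
    dsimp only
    rw [PySem.List.foldl_congr_mem _ _ (fun q (x : String × List String) =>
        if (x.2.length : Int) = pvFmin (p.2.length : Int) t then q ++ [x.1] else q) _
      (by intro acc x hx; simp only [hlk x hx])]
    rw [pvAcollect_eq]
    have hB : (List.foldl (fun (st : Option Int × List String) q =>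
        match st.1 with
        | none => (some ((q.2.length : Int)), [q.1])
        | some m =>
          if (q.2.length : Int) < m then (some (q.2.length : Int), [q.1])
          else if (q.2.length : Int) = m then (some m, st.2 ++ [q.1])
          else st) ((none : Option Int), ([] : List String)) (p :: t))
        = (some (pvFmin (p.2.length : Int) t),
           (if pvFmin (p.2.length : Int) t < (p.2.length : Int) then [] else [p.1])
             ++ (t.filter (fun q => decide ((q.2.length : Int) = pvFmin (p.2.length : Int) t))).map Prod.fst) := by
      rw [List.foldl_cons]; exact pvB_eq t _ _
    rw [hB]
    have hle : pvFmin (p.2.length : Int) t ≤ (p.2.length : Int) := pvFmin_le _ _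
    simp only [List.filter_cons, List.nil_append]
    set M := pvFmin ((p.2.length : Int)) t with hMeq
    by_cases h : (p.2.length : Int) = M
    · simp [h]
    · have hl : M < (p.2.length : Int) := lt_of_le_of_ne hle (by omega)
      simp [h, hl]
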